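-- pv_equiv track=rewrite | github.com/fdamken/advent-of-code | 2023/10/10b.py | _tick_infections
-- ===== SOURCE A (Python) =====
-- from copy import deepcopy
--
-- def _get_surrounding_tiles(lines: list[str], x: int, y: int) \
--         -> tuple[tuple[tuple[int, int], str], tuple[tuple[int, int], str], tuple[tuple[int, int], str], tuple[tuple[int, int], str]]:
--     return (
--         ((x, y - 1), lines[y - 1][x]),
--         ((x, y + 1), lines[y + 1][x]),
--         ((x - 1, y), lines[y][x - 1]),
--         ((x + 1, y), lines[y][x + 1]),
--     )
--
-- def _tick_infections(infections: list[list[int]], lines: list[str]) -> bool: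
--     old_infections = deepcopy(infections)
--     for y, infections_row in enumerate(old_infections[1:-1], start=1):
--         for x, infection in enumerate(infections_row[1:-1], start=1):
--             if infection != 0:
--                 # already infected, this does not spread further
--                 continue
--             (above_coordinates, above_tile), (below_coordinates, below_tile), (left_coordinates, left_tile), (right_coordinates, right_tile) = _get_surrounding_tiles(lines, x, y)
--             above_infection = old_infections[above_coordinates[1]][above_coordinates[0]]
--             below_infection = old_infections[below_coordinates[1]][below_coordinates[0]]
--             left_infection = old_infections[left_coordinates[1]][left_coordinates[0]]
--             right_infection = old_infections[right_coordinates[1]][right_coordinates[0]]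
--
--             # first spread the infection towards the new tile
--             if above_infection & 0b0010 != 0:
--                 # infection from above left
--                 infection |= 0b1000
--             if above_infection & 0b0001 != 0:
--                 # infection from above right
--                 infection |= 0b0100
--             if below_infection & 0b1000 != 0:
--                 # infection from below left
--                 infection |= 0b0010
--             if below_infection & 0b0100 != 0:
--                 # infection from below right
--                 infection |= 0b0001
--             if left_infection & 0b0100 != 0:
--                 # infection from left top
--                 infection |= 0b1000
--             if left_infection & 0b0001 != 0:
--                 # infection from left bottom
--                 infection |= 0b0010
--             if right_infection & 0b1000 != 0:
--                 # infection from right top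
--                 infection |= 0b0100
--             if right_infection & 0b0010 != 0:
--                 # infection from right bottom
--                 infection |= 0b0001
--
--             # and then distribute it on that tile
--             match lines[y][x]:
--                 case "│":
--                     if infection & 0b1000 != 0 or infection & 0b0010 != 0:
--                         # completely infect left
--                         infection |= 0b1010
--                     if infection & 0b0100 != 0 or infection & 0b0001 != 0:
--                         # completely infect right
--                         infection |= 0b0101
--                 case "─":
--                     if infection & 0b1000 != 0 or infection & 0b0100 != 0:
--                         # completely infect top
--                         infection |= 0b1100
--                     if infection & 0b0010 != 0 or infection & 0b0001 != 0:
--                         # completely infect bottom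
--                         infection |= 0b0011
--                 case "└":
--                     if infection & 0b1000 != 0 or infection & 0b0010 != 0 or infection & 0b0001 != 0:
--                         # completely infect bottom left corner
--                         infection |= 0b1011
--                 case "┘":
--                     if infection & 0b0100 != 0 or infection & 0b0010 != 0 or infection & 0b0001 != 0:
--                         # completely infect bottom right corner
--                         infection |= 0b0111
--                 case "┐":
--                     if infection & 0b1000 != 0 or infection & 0b0100 != 0 or infection & 0b0001 != 0:
--                         # completely infect top right corner
--                         infection |= 0b1101
--                 case "┌":
--                     if infection & 0b1000 != 0 or infection & 0b0100 != 0 or infection & 0b0010 != 0: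
--                         # completely infect top left corner
--                         infection |= 0b1110
--                 case " ":
--                     if infection != 0:
--                         # completely infect
--                         infection |= 0b1111
--                 case _:
--                     assert False
--             infections[y][x] = infection
--     return infections != old_infections
-- ===== SOURCE B (Python) =====
-- # B: table-driven one-pass re-implementation. Instead of mutating a grid copy and
-- # comparing grids at the end, it drives the 8 spread rules and the per-pipe
-- # distribution masks from data tables and accumulates a 'changed' flag directly.
-- # NOTE: unlike A, B does NOT mutate `infections` in place; the equivalence
-- # claimed is about the RETURN value only.
--
-- # distribution table: for each pipe character, the masks m with
-- # "if infection & m: infection |= m"  (e.g. '|': left side 0b1010, right side 0b0101)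
-- _MASKS = {
--     "\u2502": (0b1010, 0b0101),
--     "\u2500": (0b1100, 0b0011),
--     "\u2514": (0b1011,),
--     "\u2518": (0b0111,),
--     "\u2510": (0b1101,),
--     "\u250c": (0b1110,),
--     " ": (0b1111,),
-- }
--
--
-- def _tick_infections(infections: list[list[int]], lines: list[str]) -> bool:
--     changed = False
--     for y in range(1, len(infections) - 1):
--         row = infections[y]
--         for x in range(1, len(row) - 1):
--             if row[x] != 0:
--                 continue
--             up, down = infections[y - 1][x], infections[y + 1][x]
--             left, right = row[x - 1], row[x + 1]
--             infection = 0
--             # spread rules: (neighbour value, bit looked at there, bit infected here)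
--             for src_value, src_bit, dst_bit in ((up, 0b0010, 0b1000), (up, 0b0001, 0b0100),
--                                                 (down, 0b1000, 0b0010), (down, 0b0100, 0b0001),
--                                                 (left, 0b0100, 0b1000), (left, 0b0001, 0b0010),
--                                                 (right, 0b1000, 0b0100), (right, 0b0010, 0b0001)):
--                 if src_value & src_bit:
--                     infection |= dst_bit
--             for mask in _MASKS[lines[y][x]]:
--                 if infection & mask:
--                     infection |= mask
--             if infection:
--                 changed = True
--     return changed
-- ===== Notes on version B (the rewrite author's own statement) =====
-- stated objective: alternative
-- what changed: B replaces A's copy-the-grid / write-back / whole-grid inequality test by a single pass that drives the 8 spread rules and the pipe distribution from data tables and accumulates the 'changed' flag directly, never building or mutating a grid (A mutates `infections` in place, B does not; the claim is about the return value).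
import Mathlib
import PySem

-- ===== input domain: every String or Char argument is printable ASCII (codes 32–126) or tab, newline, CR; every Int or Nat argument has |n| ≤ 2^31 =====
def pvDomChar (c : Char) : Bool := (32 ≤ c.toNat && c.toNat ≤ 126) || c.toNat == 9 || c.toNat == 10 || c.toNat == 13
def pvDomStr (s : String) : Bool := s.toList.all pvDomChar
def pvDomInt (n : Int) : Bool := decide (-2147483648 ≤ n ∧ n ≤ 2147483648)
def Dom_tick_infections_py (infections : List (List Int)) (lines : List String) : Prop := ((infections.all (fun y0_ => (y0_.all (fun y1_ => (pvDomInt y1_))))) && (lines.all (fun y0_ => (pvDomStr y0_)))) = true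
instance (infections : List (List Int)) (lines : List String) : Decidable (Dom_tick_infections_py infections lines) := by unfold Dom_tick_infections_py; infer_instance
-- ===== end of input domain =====

-- B is a table-driven single pass that accumulates the 'changed' flag directly instead of
-- mutating a grid copy and comparing grids; A mutates `infections` in place, B does not,
-- so the equivalence proved here is about the RETURN value only.

-- ===== PORT A =====
-- lines[y][x] (indices are ≥ 0 wherever A evaluates this; out-of-range reads default — Python
-- raises IndexError there, excluded by Pre_)
def pvLineChar (lines : List String) (y x : Int) : Char :=
  PySem.List.pyGetD (PySem.List.pyGetD lines y "").toList x ' '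

-- _get_surrounding_tiles
def get_surrounding_tiles_py (lines : List String) (x y : Int) :
    ((Int × Int) × Char) × ((Int × Int) × Char) × ((Int × Int) × Char) × ((Int × Int) × Char) :=
  (((x, y - 1), pvLineChar lines (y - 1) x),
   ((x, y + 1), pvLineChar lines (y + 1) x),
   ((x - 1, y), pvLineChar lines y (x - 1)),
   ((x + 1, y), pvLineChar lines y (x + 1)))

-- "first spread the infection towards the new tile": the eight `if`s of A's loop body
def pvSpreadA (old : List (List Int)) (lines : List String) (x y : Int) (infection : Int) : Int :=
  let s := get_surrounding_tiles_py lines x y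
  let above_coordinates := s.1.1
  let below_coordinates := s.2.1.1
  let left_coordinates := s.2.2.1.1
  let right_coordinates := s.2.2.2.1
  let above_infection := PySem.List.pyGetD (PySem.List.pyGetD old above_coordinates.2 []) above_coordinates.1 0
  let below_infection := PySem.List.pyGetD (PySem.List.pyGetD old below_coordinates.2 []) below_coordinates.1 0
  let left_infection := PySem.List.pyGetD (PySem.List.pyGetD old left_coordinates.2 []) left_coordinates.1 0
  let right_infection := PySem.List.pyGetD (PySem.List.pyGetD old right_coordinates.2 []) right_coordinates.1 0
  let infection := if PySem.Int.band above_infection 2 ≠ 0 then PySem.Int.bor infection 8 else infection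
  let infection := if PySem.Int.band above_infection 1 ≠ 0 then PySem.Int.bor infection 4 else infection
  let infection := if PySem.Int.band below_infection 8 ≠ 0 then PySem.Int.bor infection 2 else infection
  let infection := if PySem.Int.band below_infection 4 ≠ 0 then PySem.Int.bor infection 1 else infection
  let infection := if PySem.Int.band left_infection 4 ≠ 0 then PySem.Int.bor infection 8 else infection
  let infection := if PySem.Int.band left_infection 1 ≠ 0 then PySem.Int.bor infection 2 else infection
  let infection := if PySem.Int.band right_infection 8 ≠ 0 then PySem.Int.bor infection 4 else infection
  let infection := if PySem.Int.band right_infection 2 ≠ 0 then PySem.Int.bor infection 1 else infection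
  infection

-- "and then distribute it on that tile": A's `match lines[y][x]`
def pvDistA (lines : List String) (y x : Int) (infection : Int) : Int :=
  match pvLineChar lines y x with
  | '│' =>
    let infection := if PySem.Int.band infection 8 ≠ 0 ∨ PySem.Int.band infection 2 ≠ 0 then PySem.Int.bor infection 10 else infection
    let infection := if PySem.Int.band infection 4 ≠ 0 ∨ PySem.Int.band infection 1 ≠ 0 then PySem.Int.bor infection 5 else infection
    infection
  | '─' =>
    let infection := if PySem.Int.band infection 8 ≠ 0 ∨ PySem.Int.band infection 4 ≠ 0 then PySem.Int.bor infection 12 else infection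
    let infection := if PySem.Int.band infection 2 ≠ 0 ∨ PySem.Int.band infection 1 ≠ 0 then PySem.Int.bor infection 3 else infection
    infection
  | '└' =>
    if PySem.Int.band infection 8 ≠ 0 ∨ PySem.Int.band infection 2 ≠ 0 ∨ PySem.Int.band infection 1 ≠ 0 then PySem.Int.bor infection 11 else infection
  | '┘' =>
    if PySem.Int.band infection 4 ≠ 0 ∨ PySem.Int.band infection 2 ≠ 0 ∨ PySem.Int.band infection 1 ≠ 0 then PySem.Int.bor infection 7 else infection
  | '┐' =>
    if PySem.Int.band infection 8 ≠ 0 ∨ PySem.Int.band infection 4 ≠ 0 ∨ PySem.Int.band infection 1 ≠ 0 then PySem.Int.bor infection 13 else infection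
  | '┌' =>
    if PySem.Int.band infection 8 ≠ 0 ∨ PySem.Int.band infection 4 ≠ 0 ∨ PySem.Int.band infection 2 ≠ 0 then PySem.Int.bor infection 14 else infection
  | ' ' =>
    if infection ≠ 0 then PySem.Int.bor infection 15 else infection
  | _ => infection  -- `assert False`: Python raises AssertionError here; excluded by Pre_

-- A's loop body after the `continue` guard
def pvCellA (old : List (List Int)) (lines : List String) (y x : Int) (infection : Int) : Int :=
  pvDistA lines y x (pvSpreadA old lines x y infection)

def tick_infections_py (infections : List (List Int)) (lines : List String) : Bool :=
  let old := infections   -- deepcopy snapshot (values are immutable here)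
  -- the writes `infections[y][x] = infection` are ported as functional updates of the fold state
  let final := (PySem.List.enumerate (PySem.List.slice old (some 1) (some (-1))) 1).foldl
    (fun grid yrow =>
      (PySem.List.enumerate (PySem.List.slice yrow.2 (some 1) (some (-1))) 1).foldl
        (fun grid xinf =>
          if xinf.2 ≠ 0 then grid   -- already infected, does not spread further
          else PySem.List.pySetD grid yrow.1
            (PySem.List.pySetD (PySem.List.pyGetD grid yrow.1 []) xinf.1
              (pvCellA old lines yrow.1 xinf.1 xinf.2)))
        grid)
    infections
  decide (final ≠ old)

-- ===== PORT B =====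
-- the _MASKS table; [] encodes a key that is absent (Python raises KeyError, excluded by Pre_)
def pvMasks (c : Char) : List Int :=
  match c with
  | '│' => [10, 5]
  | '─' => [12, 3]
  | '└' => [11]
  | '┘' => [7]
  | '┐' => [13]
  | '┌' => [14]
  | ' ' => [15]
  | _ => []

def tick_infections_py_alt (infections : List (List Int)) (lines : List String) : Bool :=
  (PySem.List.pyRange 1 (PySem.List.len infections - 1) 1).foldl (fun changed y =>
    let row := PySem.List.pyGetD infections y []
    (PySem.List.pyRange 1 (PySem.List.len row - 1) 1).foldl (fun changed x =>
      if PySem.List.pyGetD row x 0 ≠ 0 then changed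
      else
        let up := PySem.List.pyGetD (PySem.List.pyGetD infections (y - 1) []) x 0
        let down := PySem.List.pyGetD (PySem.List.pyGetD infections (y + 1) []) x 0
        let left := PySem.List.pyGetD row (x - 1) 0
        let right := PySem.List.pyGetD row (x + 1) 0
        let infection := ([(up, 2, 8), (up, 1, 4), (down, 8, 2), (down, 4, 1),
                           (left, 4, 8), (left, 1, 2), (right, 8, 4), (right, 2, 1)] : List (Int × Int × Int)).foldl
          (fun infection r => if PySem.Int.band r.1 r.2.1 ≠ 0 then PySem.Int.bor infection r.2.2 else infection) 0
        let infection := (pvMasks (PySem.List.pyGetD (PySem.List.pyGetD lines y "").toList x ' ')).foldl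
          (fun infection mask => if PySem.Int.band infection mask ≠ 0 then PySem.Int.bor infection mask else infection) infection
        if infection ≠ 0 then true else changed)
      changed)
    false

-- ===== PRECONDITION & SPEC =====
-- Pre_ admits exactly the inputs on which A returns: for every interior cell that is still
-- uninfected (A processes exactly those) the four neighbour reads in `infections`, the three
-- line reads and the cell's own character must be in range (otherwise Python raises IndexError)
-- and the cell's character must be a known pipe character (otherwise `assert False` fires).
def pvPreCellOK (infections : List (List Int)) (lines : List String) (y x : Nat) : Bool :=
  decide (y + 1 < lines.length) &&
  decide (x < ((lines.getD (y - 1) "").toList).length) &&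
  decide (x < ((lines.getD (y + 1) "").toList).length) &&
  decide (x + 1 < ((lines.getD y "").toList).length) &&
  decide (x < (infections.getD (y - 1) []).length) &&
  decide (x < (infections.getD (y + 1) []).length) &&
  decide (((lines.getD y "").toList).getD x ' ' ∈ ([' ', '│', '─', '└', '┘', '┐', '┌'] : List Char))

def Pre_tick_infections_py (infections : List (List Int)) (lines : List String) : Prop :=
  ∀ y < infections.length, ∀ x < (infections.getD y []).length,
    (1 ≤ y ∧ y + 1 < infections.length ∧ 1 ≤ x ∧ x + 1 < (infections.getD y []).length ∧
       (infections.getD y []).getD x 0 = 0) →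
      pvPreCellOK infections lines y x = true

instance (infections : List (List Int)) (lines : List String) : Decidable (Pre_tick_infections_py infections lines) := by
  unfold Pre_tick_infections_py; infer_instance

def pvWitness_tick_infections_py : List (List Int) × List String :=
  ([[0, 0, 0], [0, 0, 0], [0, 0, 0]], ["   ", "   ", "   "])

def Spec_tick_infections_py (infections : List (List Int)) (lines : List String) (out : Bool) : Prop := out = tick_infections_py_alt infections lines
instance (infections : List (List Int)) (lines : List String) (out : Bool) : Decidable (Spec_tick_infections_py infections lines out) := by unfold Spec_tick_infections_py; infer_instance

-- ===== CLAIM (what is proved, stated in full; the proofs are below) =====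
def Claim_equal_tick_infections_py : Prop := ∀ (infections : List (List Int)) (lines : List String), Dom_tick_infections_py infections lines → Pre_tick_infections_py infections lines → Spec_tick_infections_py infections lines (tick_infections_py infections lines)

-- ===== LEMMAS AND PROOFS =====

-- The sixteen values a freshly computed infection can take (four bits)
def pvL16 : List Int := [0, 1, 2, 3, 4, 5, 6, 7, 8, 9, 10, 11, 12, 13, 14, 15]

lemma pv_slice_one_negone {α : Type} (xs : List α) :
    PySem.List.slice xs (some 1) (some (-1)) = (xs.drop 1).take (xs.length - 2) := by
  simp only [PySem.List.slice, PySem.List.clampIdx]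
  norm_num
  split
  · next h => cases xs with | nil => simp | cons a t => simp at h
  · next h =>
    have h1 : 1 ≤ xs.length := by cases xs with | nil => simp at h | cons a t => simp
    have h2 : min 1 xs.length = 1 := by omega
    rw [h2, ← List.drop_one]
    congr 1
    omega

-- A's enumerate(old[1:-1], start=1) is the index range 1..len-2 paired with the rows themselves
lemma pv_enum_slice {α : Type} (xs : List α) (d : α) :
    PySem.List.enumerate (PySem.List.slice xs (some 1) (some (-1))) 1
      = (PySem.List.pyRange 1 (PySem.List.len xs - 1) 1).map (fun j => (j, PySem.List.pyGetD xs j d)) := by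
  rw [pv_slice_one_negone]
  apply List.ext_getElem
  · simp [PySem.List.length_enumerate, PySem.List.length_pyRange_one, PySem.List.len_eq]
    omega
  · intro k h1 h2
    rw [PySem.List.getElem_enumerate, List.getElem_map, PySem.List.getElem_pyRange_one]
    have hlen : k < xs.length - 2 := by
      have := h1; rw [PySem.List.length_enumerate, List.length_take, List.length_drop] at this; omega
    have hk1 : 1 + k < xs.length := by omega
    congr 1
    rw [List.getElem_take, List.getElem_drop,
        show (1 : Int) + (k : Int) = ((1 + k : Nat) : Int) by push_cast; ring,
        PySem.List.pyGetD_natCast, List.getD_eq_getElem _ _ hk1]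

-- reading / writing one row of the grid
lemma pv_pyGetD_pySetD_self (G : List (List Int)) (y : Int) (r : List Int)
    (h0 : 0 ≤ y) (h1 : y < (G.length : Int)) :
    PySem.List.pyGetD (PySem.List.pySetD G y r) y [] = r := by
  rw [PySem.List.pySetD_of_nonneg G r h0,
      PySem.List.pyGetD_eq_getElem _ _ h0 (by simpa using h1)]
  exact List.getElem_set_self _

lemma pv_pyGetD_pySetD_ne (G : List (List Int)) (y y' : Int) (r : List Int)
    (h0 : 0 ≤ y) (h0' : 0 ≤ y') (hne : y' ≠ y) :
    PySem.List.pyGetD (PySem.List.pySetD G y r) y' [] = PySem.List.pyGetD G y' [] := by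
  rw [PySem.List.pySetD_of_nonneg G r h0,
      show y' = ((y'.toNat : Nat) : Int) by omega]
  rw [PySem.List.pyGetD_natCast, PySem.List.pyGetD_natCast]
  unfold List.getD
  rw [List.getElem?_set_ne (by omega : y.toNat ≠ y'.toNat)]

lemma pv_pySetD_pySetD (G : List (List Int)) (y : Int) (r r' : List Int) (h0 : 0 ≤ y) :
    PySem.List.pySetD (PySem.List.pySetD G y r) y r' = PySem.List.pySetD G y r' := by
  rw [PySem.List.pySetD_of_nonneg G r h0, PySem.List.pySetD_of_nonneg _ r' h0,
      PySem.List.pySetD_of_nonneg G r' h0, List.set_set]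

lemma pv_pySetD_self (G : List (List Int)) (y : Int) (h0 : 0 ≤ y) (h1 : y < (G.length : Int)) :
    PySem.List.pySetD G y (PySem.List.pyGetD G y []) = G := by
  rw [PySem.List.pyGetD_eq_getElem _ _ h0 h1, PySem.List.pySetD_of_nonneg _ _ h0]
  exact List.set_getElem_self (by omega)

-- A's inner loop only ever touches row y: it is the row-level fold, lifted
lemma pv_inner_lift (c : Int → Prop) [DecidablePred c] (v : Int → Int) (y : Int) (h0 : 0 ≤ y) :
    ∀ (xs : List Int) (G : List (List Int)), y < (G.length : Int) →
      xs.foldl (fun G₁ x => if c x then G₁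
          else PySem.List.pySetD G₁ y (PySem.List.pySetD (PySem.List.pyGetD G₁ y []) x (v x))) G
        = PySem.List.pySetD G y
            (xs.foldl (fun r x => if c x then r else PySem.List.pySetD r x (v x)) (PySem.List.pyGetD G y [])) := by
  intro xs
  induction xs with
  | nil => intro G h1; simp [List.foldl]; rw [pv_pySetD_self G y h0 h1]
  | cons x xs ih =>
    intro G h1
    simp only [List.foldl]
    by_cases hc : c x
    · rw [if_pos hc, if_pos hc, ih G h1]
    · rw [if_neg hc, if_neg hc]
      set G1 := PySem.List.pySetD G y (PySem.List.pySetD (PySem.List.pyGetD G y []) x (v x)) with hG1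
      have hlen : y < (G1.length : Int) := by rw [hG1, PySem.List.length_pySetD]; exact h1
      rw [ih G1 hlen, hG1, pv_pyGetD_pySetD_self G y _ h0 h1, pv_pySetD_pySetD _ _ _ _ h0]

-- pointwise description of the row-level fold
lemma pv_rowfold_char (c : Int → Prop) [DecidablePred c] (v : Int → Int) :
    ∀ (xs : List Int) (r : List Int), (∀ x ∈ xs, 0 ≤ x ∧ x < (r.length : Int)) →
      (xs.foldl (fun r x => if c x then r else PySem.List.pySetD r x (v x)) r).length = r.length ∧
      ∀ x' : Int, 0 ≤ x' → x' < (r.length : Int) →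
        PySem.List.pyGetD (xs.foldl (fun r x => if c x then r else PySem.List.pySetD r x (v x)) r) x' 0
          = if x' ∈ xs ∧ ¬ c x' then v x' else PySem.List.pyGetD r x' 0 := by
  intro xs
  induction xs with
  | nil => intro r _; refine ⟨rfl, ?_⟩; intro x' _ _; simp
  | cons x xs ih =>
    intro r hb
    have hx := hb x (by simp)
    by_cases hc : c x
    · have := ih r (fun z hz => hb z (by simp [hz]))
      simp only [List.foldl, if_pos hc]
      refine ⟨this.1, ?_⟩
      intro x' h0' h1'
      rw [this.2 x' h0' h1']
      by_cases hm : x' ∈ xs ∧ ¬ c x'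
      · rw [if_pos hm, if_pos ⟨by simp [hm.1], hm.2⟩]
      · rw [if_neg hm]
        by_cases hm2 : x' ∈ x :: xs ∧ ¬ c x'
        · exfalso
          rcases hm2 with ⟨hmem, hnc⟩
          rcases List.mem_cons.mp hmem with h | h
          · exact hnc (h ▸ hc)
          · exact hm ⟨h, hnc⟩
        · rw [if_neg hm2]
    · set r1 := PySem.List.pySetD r x (v x) with hr1
      have hlen1 : r1.length = r.length := PySem.List.length_pySetD r x (v x)
      have := ih r1 (fun z hz => by rw [hlen1]; exact hb z (by simp [hz]))
      simp only [List.foldl, if_neg hc]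
      refine ⟨by rw [this.1, hlen1], ?_⟩
      intro x' h0' h1'
      rw [this.2 x' h0' (by rw [hlen1]; exact h1')]
      have hget : PySem.List.pyGetD r1 x' 0 = if x' = x then v x else PySem.List.pyGetD r x' 0 := by
        rw [hr1, PySem.List.pySetD_of_nonneg r (v x) hx.1]
        by_cases he : x' = x
        · rw [if_pos he, he, PySem.List.pyGetD_eq_getElem _ _ hx.1 (by simpa using hx.2)]
          exact List.getElem_set_self _
        · rw [if_neg he,
              show x' = ((x'.toNat : Nat) : Int) by omega,
              PySem.List.pyGetD_natCast, PySem.List.pyGetD_natCast]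
          unfold List.getD
          rw [List.getElem?_set_ne (by omega : x.toNat ≠ x'.toNat)]
      by_cases hm : x' ∈ xs ∧ ¬ c x'
      · rw [if_pos hm, if_pos ⟨by simp [hm.1], hm.2⟩]
      · rw [if_neg hm, hget]
        by_cases he : x' = x
        · rw [if_pos he, if_pos ⟨by simp [he], he ▸ hc⟩, he]
        · rw [if_neg he]
          by_cases hm2 : x' ∈ x :: xs ∧ ¬ c x'
          · exfalso
            rcases hm2 with ⟨hmem, hnc⟩
            rcases List.mem_cons.mp hmem with h | h
            · exact he h
            · exact hm ⟨h, hnc⟩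
          · rw [if_neg hm2]

-- the row-level result of A on row y
def pvRowF (g : List (List Int)) (lines : List String) (y : Int) (r : List Int) : List Int :=
  (PySem.List.pyRange 1 (PySem.List.len (PySem.List.pyGetD g y []) - 1) 1).foldl
    (fun r x => if PySem.List.pyGetD (PySem.List.pyGetD g y []) x 0 ≠ 0 then r
      else PySem.List.pySetD r x (pvCellA g lines y x (PySem.List.pyGetD (PySem.List.pyGetD g y []) x 0))) r

-- pointwise description of A's outer fold
lemma pv_outer_char (g : List (List Int)) (lines : List String) :
    ∀ (ys : List Int) (G : List (List Int)), ys.Nodup → G.length = g.length →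
      (∀ y ∈ ys, 0 ≤ y ∧ y < (g.length : Int)) → (∀ y ∈ ys, PySem.List.pyGetD G y [] = PySem.List.pyGetD g y []) →
      (ys.foldl (fun G₁ y =>
          (PySem.List.pyRange 1 (PySem.List.len (PySem.List.pyGetD g y []) - 1) 1).foldl
            (fun G₂ x => if PySem.List.pyGetD (PySem.List.pyGetD g y []) x 0 ≠ 0 then G₂
              else PySem.List.pySetD G₂ y (PySem.List.pySetD (PySem.List.pyGetD G₂ y []) x
                (pvCellA g lines y x (PySem.List.pyGetD (PySem.List.pyGetD g y []) x 0)))) G₁) G).length = g.length ∧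
      (∀ y ∈ ys, PySem.List.pyGetD (ys.foldl (fun G₁ y =>
          (PySem.List.pyRange 1 (PySem.List.len (PySem.List.pyGetD g y []) - 1) 1).foldl
            (fun G₂ x => if PySem.List.pyGetD (PySem.List.pyGetD g y []) x 0 ≠ 0 then G₂
              else PySem.List.pySetD G₂ y (PySem.List.pySetD (PySem.List.pyGetD G₂ y []) x
                (pvCellA g lines y x (PySem.List.pyGetD (PySem.List.pyGetD g y []) x 0)))) G₁) G) y []
          = pvRowF g lines y (PySem.List.pyGetD g y [])) ∧
      (∀ y : Int, 0 ≤ y → y ∉ ys → PySem.List.pyGetD (ys.foldl (fun G₁ y =>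
          (PySem.List.pyRange 1 (PySem.List.len (PySem.List.pyGetD g y []) - 1) 1).foldl
            (fun G₂ x => if PySem.List.pyGetD (PySem.List.pyGetD g y []) x 0 ≠ 0 then G₂
              else PySem.List.pySetD G₂ y (PySem.List.pySetD (PySem.List.pyGetD G₂ y []) x
                (pvCellA g lines y x (PySem.List.pyGetD (PySem.List.pyGetD g y []) x 0)))) G₁) G) y []
          = PySem.List.pyGetD G y []) := by
  intro ys
  induction ys with
  | nil =>
    intro G _ hlen _ _
    exact ⟨hlen, by simp, fun y _ _ => rfl⟩
  | cons y ys ih =>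
    intro G nd hlen hbd hrow
    have hy := hbd y (by simp)
    have hyG : y < (G.length : Int) := by rw [hlen]; exact hy.2
    simp only [List.foldl]
    rw [pv_inner_lift (fun x => PySem.List.pyGetD (PySem.List.pyGetD g y []) x 0 ≠ 0)
        (fun x => pvCellA g lines y x (PySem.List.pyGetD (PySem.List.pyGetD g y []) x 0)) y hy.1 _ G hyG,
        hrow y (by simp)]
    rw [show (List.foldl
        (fun r x => if PySem.List.pyGetD (PySem.List.pyGetD g y []) x 0 ≠ 0 then r
          else PySem.List.pySetD r x (pvCellA g lines y x (PySem.List.pyGetD (PySem.List.pyGetD g y []) x 0)))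
        (PySem.List.pyGetD g y []) (PySem.List.pyRange 1 (PySem.List.len (PySem.List.pyGetD g y []) - 1) 1))
        = pvRowF g lines y (PySem.List.pyGetD g y []) from rfl]
    set G1 := PySem.List.pySetD G y (pvRowF g lines y (PySem.List.pyGetD g y [])) with hG1
    have hnd := List.nodup_cons.mp nd
    have hlen1 : G1.length = g.length := by rw [hG1, PySem.List.length_pySetD]; exact hlen
    have hrow1 : ∀ y' ∈ ys, PySem.List.pyGetD G1 y' [] = PySem.List.pyGetD g y' [] := by
      intro y' hy'
      rw [hG1, pv_pyGetD_pySetD_ne G y y' _ hy.1 (hbd y' (by simp [hy'])).1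
          (by intro he; exact hnd.1 (he ▸ hy'))]
      exact hrow y' (by simp [hy'])
    have H := ih G1 hnd.2 hlen1 (fun z hz => hbd z (by simp [hz])) hrow1
    refine ⟨H.1, ?_, ?_⟩
    · intro y' hy'
      rcases List.mem_cons.mp hy' with he | hm
      · subst he
        rw [H.2.2 y' hy.1 hnd.1, hG1, pv_pyGetD_pySetD_self G y' _ hy.1 hyG]
      · exact H.2.1 y' hm
    · intro y' h0' hny'
      rw [H.2.2 y' h0' (fun h => hny' (by simp [h])), hG1,
          pv_pyGetD_pySetD_ne G y y' _ hy.1 h0' (fun he => hny' (by simp [he]))]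

-- the per-cell predicate both programs decide: the cell is uninfected and becomes infected
def pvPb (g : List (List Int)) (lines : List String) (y x : Int) : Bool :=
  decide (PySem.List.pyGetD (PySem.List.pyGetD g y []) x 0 = 0 ∧
    pvCellA g lines y x (PySem.List.pyGetD (PySem.List.pyGetD g y []) x 0) ≠ 0)

-- bit-level facts, by computation on the sixteen possible values
lemma pv_bor_mem : ∀ s ∈ pvL16, ∀ t ∈ pvL16, PySem.Int.bor s t ∈ pvL16 := by decide

lemma pv_spread_mem (old : List (List Int)) (lines : List String) (x y : Int) :
    pvSpreadA old lines x y 0 ∈ pvL16 := by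
  unfold pvSpreadA
  have h0 : (0 : Int) ∈ pvL16 := by decide
  have h8 : (8 : Int) ∈ pvL16 := by decide
  have h4 : (4 : Int) ∈ pvL16 := by decide
  have h2 : (2 : Int) ∈ pvL16 := by decide
  have h1 : (1 : Int) ∈ pvL16 := by decide
  have step : ∀ (p : Prop) [Decidable p] (s t : Int), s ∈ pvL16 → t ∈ pvL16 →
      (if p then PySem.Int.bor s t else s) ∈ pvL16 := by
    intro p _ s t hs ht
    split
    · exact pv_bor_mem s hs t ht
    · exact hs
  exact step _ _ _ (step _ _ _ (step _ _ _ (step _ _ _ (step _ _ _ (step _ _ _ (step _ _ _ (step _ _ _ h0 h8) h4) h2) h1) h8) h2) h4) h1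

-- B's distribution fold agrees with A's match on every four-bit value
lemma pv_dist_eq (lines : List String) (y x : Int) (s : Int) (hs : s ∈ pvL16) :
    (pvMasks (PySem.List.pyGetD (PySem.List.pyGetD lines y "").toList x ' ')).foldl
        (fun infection mask => if PySem.Int.band infection mask ≠ 0 then PySem.Int.bor infection mask else infection) s
      = pvDistA lines y x s := by
  rw [show PySem.List.pyGetD (PySem.List.pyGetD lines y "").toList x ' ' = pvLineChar lines y x from rfl]
  unfold pvDistA pvMasks
  split <;> fin_cases hs <;> simp [List.foldl] <;> decide

-- B's per-cell value is A's per-cell value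
lemma pv_cell_eq (g : List (List Int)) (lines : List String) (y x : Int) :
    (let row := PySem.List.pyGetD g y []
     let up := PySem.List.pyGetD (PySem.List.pyGetD g (y - 1) []) x 0
     let down := PySem.List.pyGetD (PySem.List.pyGetD g (y + 1) []) x 0
     let left := PySem.List.pyGetD row (x - 1) 0
     let right := PySem.List.pyGetD row (x + 1) 0
     let infection := ([(up, 2, 8), (up, 1, 4), (down, 8, 2), (down, 4, 1),
                        (left, 4, 8), (left, 1, 2), (right, 8, 4), (right, 2, 1)] : List (Int × Int × Int)).foldl
       (fun infection r => if PySem.Int.band r.1 r.2.1 ≠ 0 then PySem.Int.bor infection r.2.2 else infection) 0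
     (pvMasks (PySem.List.pyGetD (PySem.List.pyGetD lines y "").toList x ' ')).foldl
       (fun infection mask => if PySem.Int.band infection mask ≠ 0 then PySem.Int.bor infection mask else infection) infection)
      = pvCellA g lines y x 0 := by
  show (pvMasks (PySem.List.pyGetD (PySem.List.pyGetD lines y "").toList x ' ')).foldl
       (fun infection mask => if PySem.Int.band infection mask ≠ 0 then PySem.Int.bor infection mask else infection)
       (([((PySem.List.pyGetD (PySem.List.pyGetD g (y - 1) []) x 0), 2, 8),
          ((PySem.List.pyGetD (PySem.List.pyGetD g (y - 1) []) x 0), 1, 4),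
          ((PySem.List.pyGetD (PySem.List.pyGetD g (y + 1) []) x 0), 8, 2),
          ((PySem.List.pyGetD (PySem.List.pyGetD g (y + 1) []) x 0), 4, 1),
          ((PySem.List.pyGetD (PySem.List.pyGetD g y []) (x - 1) 0), 4, 8),
          ((PySem.List.pyGetD (PySem.List.pyGetD g y []) (x - 1) 0), 1, 2),
          ((PySem.List.pyGetD (PySem.List.pyGetD g y []) (x + 1) 0), 8, 4),
          ((PySem.List.pyGetD (PySem.List.pyGetD g y []) (x + 1) 0), 2, 1)] : List (Int × Int × Int)).foldl
         (fun infection r => if PySem.Int.band r.1 r.2.1 ≠ 0 then PySem.Int.bor infection r.2.2 else infection) 0)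
      = pvCellA g lines y x 0
  have hsp : (([((PySem.List.pyGetD (PySem.List.pyGetD g (y - 1) []) x 0), 2, 8),
          ((PySem.List.pyGetD (PySem.List.pyGetD g (y - 1) []) x 0), 1, 4),
          ((PySem.List.pyGetD (PySem.List.pyGetD g (y + 1) []) x 0), 8, 2),
          ((PySem.List.pyGetD (PySem.List.pyGetD g (y + 1) []) x 0), 4, 1),
          ((PySem.List.pyGetD (PySem.List.pyGetD g y []) (x - 1) 0), 4, 8),
          ((PySem.List.pyGetD (PySem.List.pyGetD g y []) (x - 1) 0), 1, 2),
          ((PySem.List.pyGetD (PySem.List.pyGetD g y []) (x + 1) 0), 8, 4),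
          ((PySem.List.pyGetD (PySem.List.pyGetD g y []) (x + 1) 0), 2, 1)] : List (Int × Int × Int)).foldl
         (fun infection r => if PySem.Int.band r.1 r.2.1 ≠ 0 then PySem.Int.bor infection r.2.2 else infection) 0)
      = pvSpreadA g lines x y 0 := by
    unfold pvSpreadA get_surrounding_tiles_py
    simp only [List.foldl]
  rw [hsp, pvCellA]
  exact pv_dist_eq lines y x _ (pv_spread_mem g lines x y)

-- B computes `any of any` of the per-cell predicate
lemma pv_alt_eq_any (g : List (List Int)) (lines : List String) :
    tick_infections_py_alt g lines
      = (PySem.List.pyRange 1 (PySem.List.len g - 1) 1).any (fun y =>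
          (PySem.List.pyRange 1 (PySem.List.len (PySem.List.pyGetD g y []) - 1) 1).any (fun x =>
            pvPb g lines y x)) := by
  unfold tick_infections_py_alt
  refine Eq.trans (PySem.List.foldl_congr_mem _ _
      (fun changed y => if (PySem.List.pyRange 1 (PySem.List.len (PySem.List.pyGetD g y []) - 1) 1).any
          (fun x => pvPb g lines y x) then true else changed) _ ?_) ?_
  swap
  · rw [PySem.List.foldl_if_true_eq, Bool.false_or]
  · intro acc y _
    simp only []
    refine Eq.trans (PySem.List.foldl_congr_mem _ _
        (fun changed x => if pvPb g lines y x then true else changed) _ ?_) ?_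
    swap
    · rw [PySem.List.foldl_if_true_eq]
      cases h : (PySem.List.pyRange 1 (PySem.List.len (PySem.List.pyGetD g y []) - 1) 1).any
          (fun x => pvPb g lines y x) <;> simp
    · intro acc2 x _
      simp only []
      by_cases h0 : PySem.List.pyGetD (PySem.List.pyGetD g y []) x 0 ≠ 0
      · rw [if_pos h0]
        have : pvPb g lines y x = false := by simp [pvPb]; intro h; exact absurd h h0
        rw [this]
        simp
      · rw [if_neg h0]
        rw [not_not] at h0
        rw [pv_cell_eq g lines y x]
        have : pvPb g lines y x = decide (pvCellA g lines y x 0 ≠ 0) := by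
          simp [pvPb, h0]
        rw [this]
        by_cases hc : pvCellA g lines y x 0 ≠ 0
        · rw [if_pos hc]; simp [hc]
        · rw [if_neg hc]; rw [not_not] at hc; simp [hc]

lemma pv_eq_of_pyGetD {α : Type} (d : α) (l r : List α) (hl : l.length = r.length)
    (h : ∀ k : Nat, k < r.length → PySem.List.pyGetD l (k : Int) d = PySem.List.pyGetD r (k : Int) d) :
    l = r := by
  apply List.ext_getElem hl
  intro k h1 h2
  have := h k h2
  rw [PySem.List.pyGetD_eq_getElem _ _ (by positivity) (by exact_mod_cast h1),
      PySem.List.pyGetD_eq_getElem _ _ (by positivity) (by exact_mod_cast h2)] at this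
  simpa using this

lemma pv_rowdiff (g : List (List Int)) (lines : List String) (y : Int) :
    pvRowF g lines y (PySem.List.pyGetD g y []) ≠ PySem.List.pyGetD g y []
      ↔ (PySem.List.pyRange 1 (PySem.List.len (PySem.List.pyGetD g y []) - 1) 1).any
          (fun x => pvPb g lines y x) = true := by
  have hb : ∀ x ∈ PySem.List.pyRange 1 (PySem.List.len (PySem.List.pyGetD g y []) - 1) 1,
      0 ≤ x ∧ x < ((PySem.List.pyGetD g y []).length : Int) := by
    intro x hx
    have := (PySem.List.mem_pyRange_one).mp hx
    rw [PySem.List.len_eq] at this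
    omega
  have H := pv_rowfold_char (fun x => PySem.List.pyGetD (PySem.List.pyGetD g y []) x 0 ≠ 0)
      (fun x => pvCellA g lines y x (PySem.List.pyGetD (PySem.List.pyGetD g y []) x 0))
      (PySem.List.pyRange 1 (PySem.List.len (PySem.List.pyGetD g y []) - 1) 1)
      (PySem.List.pyGetD g y []) hb
  have hF : pvRowF g lines y (PySem.List.pyGetD g y [])
      = (PySem.List.pyRange 1 (PySem.List.len (PySem.List.pyGetD g y []) - 1) 1).foldl
          (fun r' x => if PySem.List.pyGetD (PySem.List.pyGetD g y []) x 0 ≠ 0 then r'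
            else PySem.List.pySetD r' x (pvCellA g lines y x (PySem.List.pyGetD (PySem.List.pyGetD g y []) x 0)))
          (PySem.List.pyGetD g y []) := rfl
  constructor
  · intro hne
    by_contra hany
    apply hne
    rw [hF]
    apply pv_eq_of_pyGetD 0 _ _ H.1
    intro k hk
    rw [H.2 (k : Int) (by positivity) (by exact_mod_cast hk)]
    split
    · next hcond =>
      have hval : PySem.List.pyGetD (PySem.List.pyGetD g y []) (k : Int) 0 = 0 := not_not.mp hcond.2
      have hpbf : pvPb g lines y (k : Int) = false := by
        cases hpb : pvPb g lines y (k : Int)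
        · rfl
        · exact absurd (List.any_eq_true.mpr ⟨(k : Int), hcond.1, hpb⟩) hany
      have hnp : ¬ (PySem.List.pyGetD (PySem.List.pyGetD g y []) (k : Int) 0 = 0 ∧
          pvCellA g lines y (k : Int) (PySem.List.pyGetD (PySem.List.pyGetD g y []) (k : Int) 0) ≠ 0) := by
        simpa [pvPb] using hpbf
      have hcell : pvCellA g lines y (k : Int) (PySem.List.pyGetD (PySem.List.pyGetD g y []) (k : Int) 0) = 0 := by
        by_contra hc
        exact hnp ⟨hval, hc⟩
      simpa [hval] using hcell
    · rfl
  · intro hany hEq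
    rcases List.any_eq_true.mp hany with ⟨x, hx, hpx⟩
    have hpx' := of_decide_eq_true hpx
    have hbx := hb x hx
    have hptw := H.2 x hbx.1 hbx.2
    rw [if_pos ⟨hx, not_not.mpr hpx'.1⟩] at hptw
    rw [← hF, hEq] at hptw
    exact hpx'.2 (by simpa [hpx'.1] using hptw.symm)

-- A returns `any of any` of the same predicate
lemma pv_a_eq_any (g : List (List Int)) (lines : List String) :
    tick_infections_py g lines
      = (PySem.List.pyRange 1 (PySem.List.len g - 1) 1).any (fun y =>
          (PySem.List.pyRange 1 (PySem.List.len (PySem.List.pyGetD g y []) - 1) 1).any (fun x =>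
            pvPb g lines y x)) := by
  unfold tick_infections_py
  dsimp only
  have hinner : ∀ xs : List Int, PySem.List.enumerate (PySem.List.slice xs (some 1) (some (-1))) 1
      = (PySem.List.pyRange 1 (PySem.List.len xs - 1) 1).map (fun j => (j, PySem.List.pyGetD xs j 0)) :=
    fun xs => pv_enum_slice xs 0
  rw [pv_enum_slice g ([] : List Int), List.foldl_map]
  simp only [hinner, List.foldl_map]
  have H := pv_outer_char g lines (PySem.List.pyRange 1 (PySem.List.len g - 1) 1) g
      (PySem.List.nodup_pyRange_one _ _) rfl
      (by intro y hy
          have := (PySem.List.mem_pyRange_one).mp hy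
          rw [PySem.List.len_eq] at this
          omega)
      (fun _ _ => rfl)
  rw [Bool.eq_iff_iff, decide_eq_true_eq]
  constructor
  · intro hne
    by_contra hany
    apply hne
    apply pv_eq_of_pyGetD ([] : List Int) _ _ H.1
    intro k h2
    by_cases hmem : (k : Int) ∈ PySem.List.pyRange 1 (PySem.List.len g - 1) 1
    · rw [H.2.1 (k : Int) hmem]
      by_contra hneq
      apply hany
      refine List.any_eq_true.mpr ⟨(k : Int), hmem, ?_⟩
      refine (pv_rowdiff g lines (k : Int)).mp ?_
      exact hneq
    · exact H.2.2 (k : Int) (by positivity) hmem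
  · intro hany
    rcases List.any_eq_true.mp hany with ⟨y, hy, hinner2⟩
    intro hEq
    have hd := (pv_rowdiff g lines y).mpr hinner2
    apply hd
    rw [← H.2.1 y hy]
    have hyb := (PySem.List.mem_pyRange_one).mp hy
    rw [PySem.List.len_eq] at hyb
    calc PySem.List.pyGetD _ y [] = PySem.List.pyGetD g y [] := by rw [hEq]

-- ===== VERDICT (by name: the statement is the Claim_ definition above) =====
theorem tick_infections_py_spec : Claim_equal_tick_infections_py := by
  intro infections lines _ _
  unfold Spec_tick_infections_py
  rw [pv_a_eq_any, pv_alt_eq_any]
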